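-- pv_equiv track=rewrite | github.com/KirillMishkin/GB_algorithm | less8_task_1.py | hello_friend
-- ===== SOURCE A (Python) =====
-- from collections import deque
--
-- def hello_friend(name_friends: list):
--     hello = {}
--     searched = set()  # Тут храним друзей которых уже проверили
--     for name in name_friends:  # Перебираем друзей берем вршину vertex и смотрим кто с ней связан
--         search_hi = deque(name_friends)  # Создаем очередь из друзей
--         while search_hi:  # Пока очередь не пустая цикл работает
--             person = search_hi.popleft()  # Берем друга из очереди
--             if name != person:  # если имя друга равно его имени ,
--                 # То он сам с собой не здоровается
--                 if person not in searched:  # проверяем есть ли этот друг в списке првоеренных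
--                     if name not in hello:  # классическое создание словаря
--                         hello[name] = {person}
--                         searched.add(name)
--                     else:
--                         hello[name].add(person)
--     else:
--         hello[name_friends[-1]] = set()  # Добавляем последнего дргуа с словарь , показывая что с ним все поздоровались
--     return hello
-- ===== SOURCE B (Python) =====
-- def hello_friend(name_friends: list):
--     # Closed form: each distinct name greets exactly the distinct names whose first
--     # occurrence comes after its own; the last listed friend is overridden to greet no one.
--     order = list(dict.fromkeys(name_friends))
--     hello = {name: set(order[i + 1:]) for i, name in enumerate(order[:-1])}
--     hello[name_friends[-1]] = set()
--     return hello
-- ===== Notes on version B (the rewrite author's own statement) =====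
-- stated objective: simpler
-- what changed: B replaces A's nested deque rescans with mutable hello/searched bookkeeping by a closed form: dedup the names once and map each distinct name except the last to the set of distinct names whose first occurrence comes after its own (suffix slices of the deduped list), then override the last listed friend with an empty set.
import Mathlib
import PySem

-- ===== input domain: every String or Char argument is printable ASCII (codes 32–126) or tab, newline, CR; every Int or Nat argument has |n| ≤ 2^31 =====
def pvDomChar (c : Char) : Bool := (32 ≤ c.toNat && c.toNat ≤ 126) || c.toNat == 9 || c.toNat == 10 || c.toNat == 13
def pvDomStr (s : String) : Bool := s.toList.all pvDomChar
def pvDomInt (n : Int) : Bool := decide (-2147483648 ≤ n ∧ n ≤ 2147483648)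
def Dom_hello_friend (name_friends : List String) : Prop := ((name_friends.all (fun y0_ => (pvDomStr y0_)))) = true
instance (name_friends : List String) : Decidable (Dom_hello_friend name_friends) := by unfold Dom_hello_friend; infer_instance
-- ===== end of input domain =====

-- B replaces A's nested deque rescans with mutable searched-set bookkeeping by a closed form:
-- dedup once, map each distinct name (except the last) to the suffix of distinct names after it.
-- ===== PORT A =====
-- body of A's inner 'while search_hi' loop (one popped person)
def helloStep (name : String)
    (st : PySem.Dict String (List String) × PySem.Set String) (person : String) :
    PySem.Dict String (List String) × PySem.Set String :=
  if name ≠ person then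
    if ¬ (PySem.Set.contains st.2 person) then
      if ¬ (st.1.contains name) then
        (st.1.insert name (PySem.Set.ofList [person]), PySem.Set.add st.2 name)
      else
        (st.1.modify name [] (fun v => PySem.Set.add v person), st.2)
    else st
  else st

def hello_friend (name_friends : List String) : List (String × List String) :=
  let st := name_friends.foldl
    (fun st name => name_friends.foldl (helloStep name) st)
    (PySem.Dict.empty, PySem.Set.empty)
  match PySem.List.pyGet? name_friends (-1) with
  | some last => (st.1.insert last ([] : List String)).items
  | none => st.1.items   -- unreachable under Pre_: Python raises IndexError on []

-- ===== PORT B =====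
-- 'list(dict.fromkeys(...))' = PySem.List.dedup; the slices order[:-1] and order[i+1:]
-- are PySem.List.slice (exact); the dict comprehension is a fold of inserts over enumerate.
def hello_friend_alt (name_friends : List String) : List (String × List String) :=
  let order := PySem.List.dedup name_friends
  let hello := (PySem.List.enumerate (PySem.List.slice order none (some (-1)))).foldl
      (fun (d : PySem.Dict String (List String)) (p : Int × String) =>
        d.insert p.2 (PySem.Set.ofList (PySem.List.slice order (some (p.1 + 1)) none)))
      PySem.Dict.empty
  match PySem.List.pyGet? name_friends (-1) with
  | some last => (hello.insert last ([] : List String)).items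
  | none => hello.items   -- unreachable under Pre_: Python raises IndexError on []

-- ===== PRECONDITION & SPEC =====
-- Pre_ excludes only the empty list, on which both Pythons raise IndexError at name_friends[-1].
def Pre_hello_friend (name_friends : List String) : Prop := name_friends ≠ []
instance (name_friends : List String) : Decidable (Pre_hello_friend name_friends) := by
  unfold Pre_hello_friend; infer_instance
def pvWitness_hello_friend : List String := ["anna", "bob", "anna", "carl"]

def Spec_hello_friend (name_friends : List String) (out : List (String × List String)) : Prop := out = hello_friend_alt name_friends
instance (name_friends : List String) (out : List (String × List String)) : Decidable (Spec_hello_friend name_friends out) := by unfold Spec_hello_friend; infer_instance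

-- ===== CLAIM (what is proved, stated in full; the proofs are below) =====
def Claim_equal_hello_friend : Prop := ∀ (name_friends : List String), Dom_hello_friend name_friends → Pre_hello_friend name_friends → Spec_hello_friend name_friends (hello_friend name_friends)

-- ===== LEMMAS AND PROOFS =====

-- proof-side reference loop: one pass over the distinct names with a growing searched set;
-- A's nested loops are reduced to it, and it in turn is evaluated to B's closed form.
def helloAltStep (distinct : List String)
    (st : PySem.Dict String (List String) × PySem.Set String) (name : String) :
    PySem.Dict String (List String) × PySem.Set String :=
  let eligible := PySem.Set.ofList
    (distinct.filter (fun p => decide (p ≠ name ∧ ¬ PySem.Set.contains st.2 p)))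
  if eligible ≠ [] then (st.1.insert name eligible, PySem.Set.add st.2 name) else st

-- helper predicate: the persons `name` still greets, given searched-set s
def epred (s : PySem.Set String) (name : String) (p : String) : Bool :=
  decide (p ≠ name ∧ ¬ PySem.Set.contains s p)

theorem dict_insert_getD_self {ν : Type} (d : PySem.Dict String ν) (k : String) (dflt : ν)
    (hc : d.contains k = true) (hnd : d.keys.Nodup) : d.insert k (d.getD k dflt) = d := by
  apply PySem.Dict.ext
  rw [PySem.Dict.items_insert_of_contains _ _ hc]
  conv_rhs => rw [← List.map_id d.items]
  apply List.map_congr_left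
  intro p hp
  by_cases hk : (p.1 == k) = true
  · have hk' : p.1 = k := eq_of_beq hk
    have h2 : d.getD k dflt = p.2 := by
      apply PySem.Dict.getD_of_mem_items _ _ hnd
      rw [← hk']; simpa using hp
    have h3 : d.getD p.1 dflt = p.2 := hk' ▸ h2
    simp [← hk', h3]
  · simp [hk]

theorem ofList_filter (l : List String) (q : String → Bool) :
    PySem.Set.ofList (l.filter q) = (PySem.Set.ofList l).filter q := by
  induction l using List.reverseRecOn with
  | nil => simp [PySem.Set.ofList]
  | append_singleton xs x ih =>
    rw [List.filter_append, PySem.Set.ofList_append_singleton, PySem.Set.add_eq_ite]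
    by_cases hq : q x
    · simp only [hq, List.filter_cons, List.filter_nil, if_pos]
      rw [PySem.Set.ofList_append_singleton, PySem.Set.add_eq_ite, ih]
      by_cases hx : x ∈ PySem.Set.ofList xs
      · simp [hx, List.mem_filter, hq]
      · simp [hx, List.mem_filter, List.filter_append, hq]
    · simp only [hq, List.filter_cons, List.filter_nil, if_neg, Bool.false_eq_true,
        not_false_iff, List.append_nil, ih]
      by_cases hx : x ∈ PySem.Set.ofList xs
      · simp [hx]
      · simp [hx, List.filter_append, hq]

theorem ofList_eq_nil_iff (l : List String) : PySem.Set.ofList l = [] ↔ l = [] := by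
  cases l with
  | nil => simp [PySem.Set.ofList]
  | cons x xs => rw [PySem.Set.ofList_cons]; simp

theorem epred_add_self (s : PySem.Set String) (name p : String) :
    epred (s.add name) name p = epred s name p := by
  by_cases hp : p = name
  · simp [epred, hp]
  · simp [epred, hp, PySem.Set.mem_add]

theorem ofList_cons_eq_update (p : String) (xs : List String) :
    PySem.Set.ofList (p :: xs) = PySem.Set.update [p] xs := by
  rfl

-- A's inner loop when `name` is already a key: it accumulates the eligible persons
theorem foldA_key (name : String) (l : List String) :
    ∀ (h : PySem.Dict String (List String)) (s : PySem.Set String),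
    h.contains name = true → h.keys.Nodup →
    l.foldl (helloStep name) (h, s)
      = (h.insert name (PySem.Set.update (h.getD name []) (l.filter (epred s name))), s) := by
  induction l with
  | nil =>
    intro h s hc hnd
    simp [PySem.Set.update, dict_insert_getD_self h name [] hc hnd]
  | cons p l ih =>
    intro h s hc hnd
    rw [List.foldl_cons]
    by_cases hpn : name = p
    · have he : epred s name p = false := by simp [epred, hpn]
      rw [show helloStep name (h, s) p = (h, s) by simp [helloStep, hpn]]
      rw [ih h s hc hnd]
      simp [he]
    · by_cases hps : PySem.Set.contains s p = true
      · have hps' : p ∈ s := (PySem.Set.contains_iff s p).mp hps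
        have he : epred s name p = false := by simp [epred, hps']
        rw [show helloStep name (h, s) p = (h, s) by simp [helloStep, hpn, hps']]
        rw [ih h s hc hnd]
        simp [he]
      · have hps'' : ¬ p ∈ s := fun hm => hps ((PySem.Set.contains_iff s p).mpr hm)
        have he : epred s name p = true := by
          simp only [epred, decide_eq_true_eq]
          exact ⟨fun h' => hpn h'.symm, hps⟩
        have hstep : helloStep name (h, s) p
            = (h.insert name (PySem.Set.add (h.getD name []) p), s) := by
          simp [helloStep, hpn, hps'', hc, PySem.Dict.modify]
        rw [hstep]
        rw [ih _ s (PySem.Dict.contains_insert_self h name _)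
              (PySem.Dict.nodup_keys_insert h name _ hnd)]
        rw [PySem.Dict.getD_insert_self, PySem.Dict.insert_insert_self]
        simp [he, PySem.Set.update_cons]

-- A's inner loop when `name` is not yet a key
theorem foldA_fresh (name : String) (l : List String)
    (h : PySem.Dict String (List String)) (s : PySem.Set String)
    (hc : h.contains name = false) (hnd : h.keys.Nodup) :
    l.foldl (helloStep name) (h, s)
      = if l.filter (epred s name) = [] then (h, s)
        else (h.insert name (PySem.Set.ofList (l.filter (epred s name))), PySem.Set.add s name) := by
  induction l with
  | nil => rw [List.foldl_nil, List.filter_nil, if_pos rfl]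
  | cons p l ih =>
    rw [List.foldl_cons]
    by_cases he : epred s name p = true
    · have hpn : p ≠ name ∧ ¬ PySem.Set.contains s p = true := by
        simpa [epred] using he
      have hps'' : ¬ p ∈ s := fun hm => hpn.2 ((PySem.Set.contains_iff s p).mpr hm)
      have hnp : ¬ name = p := fun h' => hpn.1 h'.symm
      have hstep : helloStep name (h, s) p
          = (h.insert name (PySem.Set.ofList [p]), PySem.Set.add s name) := by
        simp [helloStep, hnp, hps'', hc]
      rw [hstep]
      rw [foldA_key name l _ _ (PySem.Dict.contains_insert_self h name _)
            (PySem.Dict.nodup_keys_insert h name _ hnd)]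
      rw [PySem.Dict.getD_insert_self, PySem.Dict.insert_insert_self]
      rw [show epred (PySem.Set.add s name) name = epred s name from funext (epred_add_self s name)]
      simp only [List.filter_cons, he, if_pos]
      rw [if_neg (List.cons_ne_nil _ _)]
      rw [ofList_cons_eq_update]
      rfl
    · have hstep : helloStep name (h, s) p = (h, s) := by
        have hor : p = name ∨ p ∈ s := by
          by_cases h1 : p = name
          · exact Or.inl h1
          · refine Or.inr ?_
            simpa [epred, h1, Decidable.not_not, PySem.Set.contains_iff] using he
        rcases hor with h1 | h1
        · simp [helloStep, h1]
        · by_cases hpn : name = p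
          · simp [helloStep, hpn]
          · simp [helloStep, hpn, h1]
      rw [hstep, ih]
      simp [he]

-- A's inner loop is a no-op when `name` is a key that already holds everything eligible
theorem foldA_dup (name : String) (l : List String)
    (h : PySem.Dict String (List String)) (s : PySem.Set String)
    (hc : h.contains name = true) (hnd : h.keys.Nodup)
    (hsub : ∀ p ∈ l, epred s name p = true → p ∈ h.getD name []) :
    l.foldl (helloStep name) (h, s) = (h, s) := by
  rw [foldA_key name l h s hc hnd]
  have hupd : PySem.Set.update (h.getD name []) (l.filter (epred s name)) = h.getD name [] := by
    rw [PySem.Set.update_eq_append_filter]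
    have : List.filter (fun y => !(PySem.Set.contains (h.getD name []) y))
        (PySem.Set.ofList (l.filter (epred s name))) = [] := by
      rw [List.filter_eq_nil_iff]
      intro y hy
      rw [PySem.Set.mem_ofList, List.mem_filter] at hy
      have hmem : y ∈ h.getD name [] := hsub y hy.1 hy.2
      simpa using hmem
    rw [this, List.append_nil]
  rw [hupd, dict_insert_getD_self h name [] hc hnd]

-- the main induction: A's remaining outer loop = the reference loop over the unprocessed distinct names
theorem go (NF : List String) (suf : List String) :
    ∀ (P : List String) (h : PySem.Dict String (List String)) (s : PySem.Set String),
    h.keys.Nodup → s = h.keys → (∀ k ∈ h.keys, k ∈ P) →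
    (∀ n, h.contains n = true → ∀ p ∈ NF, p ≠ n → ¬ p ∈ s → p ∈ h.getD n []) →
    (∀ n ∈ P, h.contains n = false → ∀ p ∈ NF, p ≠ n → p ∈ s) →
    suf.foldl (fun st name => NF.foldl (helloStep name) st) (h, s)
      = ((PySem.List.dedup suf).filter (fun x => decide (¬ x ∈ P))).foldl
          (helloAltStep (PySem.List.dedup NF)) (h, s) := by
  induction suf with
  | nil => intro P h s _ _ _ _ _; simp [PySem.List.dedup, PySem.Set.ofList]
  | cons x rest ih =>
    intro P h s hnd hsk hkP hc1 hc2
    rw [List.foldl_cons]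
    rw [show PySem.List.dedup (x :: rest) = x :: (PySem.List.dedup rest).filter (fun y => !(y == x)) by
      rw [PySem.List.dedup_eq_ofList, PySem.Set.ofList_cons, ← PySem.List.dedup_eq_ofList]; rfl]
    by_cases hxP : x ∈ P
    · -- x was processed before: A's inner pass is a no-op, the reference loop skips x
      have hnoop : NF.foldl (helloStep x) (h, s) = (h, s) := by
        by_cases hcx : h.contains x = true
        · exact foldA_dup x NF h s hcx hnd (fun p hp hep => by
            have := hc1 x hcx p hp
            simp only [epred, decide_eq_true_eq] at hep
            exact this hep.1 (by simpa [PySem.Set.contains_iff] using hep.2))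
        · have hcx' : h.contains x = false := by simpa using hcx
          have hfe : NF.filter (epred s x) = [] := by
            rw [List.filter_eq_nil_iff]
            intro p hp hep
            simp only [epred, decide_eq_true_eq] at hep
            exact hep.2 ((PySem.Set.contains_iff s p).mpr (hc2 x hxP hcx' p hp hep.1))
          rw [foldA_fresh x NF h s hcx' hnd, if_pos hfe]
      rw [hnoop, ih P h s hnd hsk hkP hc1 hc2]
      congr 1
      rw [List.filter_cons]
      simp only [hxP, not_true_eq_false, decide_false, Bool.false_eq_true]
      rw [List.filter_filter]
      apply List.filter_congr
      intro y _
      by_cases hyP : y ∈ P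
      · simp [hyP]
      · have hyx : ¬ y = x := fun h' => hyP (h' ▸ hxP)
        simp [hyP, hyx]
    · -- x is new: A's inner pass does exactly the reference step
      have hcx : h.contains x = false := by
        cases hcq : h.contains x
        · rfl
        · exact absurd (hkP x ((PySem.Dict.contains_iff_mem_keys h x).mp hcq)) hxP
      have hxs : ¬ x ∈ s := by
        rw [hsk]; intro hmem
        exact absurd ((PySem.Dict.contains_iff_mem_keys h x).mpr hmem) (by simp [hcx])
      have helig : PySem.Set.ofList ((PySem.List.dedup NF).filter (epred s x))
          = PySem.Set.ofList (NF.filter (epred s x)) := by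
        rw [PySem.List.dedup_eq_ofList, ← ofList_filter, PySem.Set.ofList_ofList]
      have hfilter_iff : NF.filter (epred s x) = [] ↔ (PySem.Set.ofList NF).filter (epred s x) = [] := by
        rw [← ofList_filter]
        constructor
        · intro h'; rw [h']; rfl
        · intro h'; exact (ofList_eq_nil_iff _).mp h'
      have hstepB : helloAltStep (PySem.List.dedup NF) (h, s) x
          = if NF.filter (epred s x) = [] then (h, s)
            else (h.insert x (PySem.Set.ofList (NF.filter (epred s x))), PySem.Set.add s x) := by
        show (let eligible := PySem.Set.ofList ((PySem.List.dedup NF).filter (epred s x));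
          if eligible ≠ [] then (PySem.Dict.insert h x eligible, PySem.Set.add s x) else (h, s)) = _
        rw [helig]
        by_cases hfe : NF.filter (epred s x) = []
        · have h2 : PySem.Set.ofList (NF.filter (epred s x)) = [] := by rw [hfe]; rfl
          simp [hfe]
        · have h2 : PySem.Set.ofList (NF.filter (epred s x)) ≠ [] :=
            fun h' => hfe ((ofList_eq_nil_iff _).mp h')
          simp [h2, hfe]
      rw [foldA_fresh x NF h s hcx hnd]
      rw [List.filter_cons]
      simp only [hxP, not_false_eq_true, decide_true, if_pos]
      rw [List.foldl_cons, hstepB]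
      have hfilterP : ((PySem.List.dedup rest).filter (fun y => !(y == x))).filter
          (fun y => decide (¬ y ∈ P))
          = (PySem.List.dedup rest).filter (fun y => decide (¬ y ∈ (x :: P))) := by
        rw [List.filter_filter]
        apply List.filter_congr
        intro y _
        by_cases hyx : y = x
        · simp [hyx]
        · simp [hyx, List.mem_cons]
      by_cases hfe : NF.filter (epred s x) = []
      · rw [if_pos hfe]
        rw [ih (x :: P) h s hnd hsk (fun k hk => List.mem_cons_of_mem x (hkP k hk)) hc1 ?_ , hfilterP]
        intro n hn hcn p hp hpn
        rcases List.mem_cons.mp hn with h' | h'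
        · subst h'
          have : ¬ epred s n p = true := by
            intro he
            have : p ∈ NF.filter (epred s n) := List.mem_filter.mpr ⟨hp, he⟩
            simp [hfe] at this
          simp only [epred, decide_eq_true_eq, not_and, Decidable.not_not] at this
          exact (PySem.Set.contains_iff _ _).mp (this hpn)
        · exact hc2 n h' hcn p hp hpn
      · rw [if_neg hfe]
        set elig := PySem.Set.ofList (NF.filter (epred s x)) with helig_def
        have hkeys' : (h.insert x elig).keys = h.keys ++ [x] :=
          PySem.Dict.keys_insert_of_not_contains h elig hcx
        rw [ih (x :: P) (h.insert x elig) (PySem.Set.add s x)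
              (PySem.Dict.nodup_keys_insert h x elig hnd) ?_ ?_ ?_ ?_, hfilterP]
        · rw [hkeys', hsk, PySem.Set.add_eq_ite, if_neg (by rw [← hsk]; exact hxs)]
        · intro k hk
          rw [hkeys'] at hk
          rcases List.mem_append.mp hk with h' | h'
          · exact List.mem_cons_of_mem x (hkP k h')
          · simp only [List.mem_singleton] at h'; subst h'; exact List.mem_cons_self
        · intro n hcn p hp hpn hps
          have hps' : ¬ p ∈ s := fun h' => hps ((PySem.Set.mem_add s x p).mpr (Or.inl h'))
          by_cases hnx : n = x
          · subst hnx
            rw [PySem.Dict.getD_insert_self, helig_def, PySem.Set.mem_ofList, List.mem_filter]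
            refine ⟨hp, ?_⟩
            simp [epred, hpn, hps']
          · rw [PySem.Dict.getD_insert_of_ne _ _ _ hnx]
            rw [PySem.Dict.contains_insert] at hcn
            rcases Bool.or_eq_true_iff.mp hcn with h' | h'
            · exact absurd (eq_of_beq h') hnx
            · exact hc1 n h' p hp hpn hps'
        · intro n hn hcn p hp hpn
          have hnx : n ≠ x := by
            intro h'; subst h'
            rw [PySem.Dict.contains_insert_self] at hcn; simp at hcn
          have hcn' : h.contains n = false := by
            rw [PySem.Dict.contains_insert] at hcn
            exact (Bool.or_eq_false_iff.mp hcn).2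
          rcases List.mem_cons.mp hn with h' | h'
          · exact absurd h' hnx
          · exact (PySem.Set.mem_add s x p).mpr (Or.inl (hc2 n h' hcn' p hp hpn))

theorem core (NF : List String) :
    NF.foldl (fun st name => NF.foldl (helloStep name) st) (PySem.Dict.empty, PySem.Set.empty)
      = (PySem.List.dedup NF).foldl (helloAltStep (PySem.List.dedup NF))
          (PySem.Dict.empty, PySem.Set.empty) := by
  have h := go NF NF [] PySem.Dict.empty PySem.Set.empty
    (by rw [PySem.Dict.keys_empty]; exact List.nodup_nil)
    (by rw [PySem.Dict.keys_empty]; rfl)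
    (by rw [PySem.Dict.keys_empty]; intro k hk; simp at hk)
    (by intro n hc; rw [PySem.Dict.contains_empty] at hc; simp at hc)
    (by intro n hn; simp at hn)
  rw [h]
  congr 1
  simp

-- ===== closed-form evaluation of the reference loop =====

-- (name, names after it) pairs of a nodup list, all but the last name
def suffPairs : List String → List (String × List String)
  | [] => []
  | [_] => []
  | x :: y :: rest => (x, y :: rest) :: suffPairs (y :: rest)

theorem stepB (D pre rest : List String) (x : String)
    (h : PySem.Dict String (List String)) (hnd : D.Nodup) (hD : D = pre ++ x :: rest) :
    helloAltStep D (h, PySem.Set.ofList pre) x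
      = if rest = [] then (h, PySem.Set.ofList pre)
        else (h.insert x (PySem.Set.ofList rest), PySem.Set.ofList (pre ++ [x])) := by
  subst hD
  rcases List.nodup_append.mp hnd with ⟨hpre, hxr, hdisj⟩
  have hfilt : (pre ++ x :: rest).filter
      (fun p => decide (p ≠ x ∧ ¬ PySem.Set.contains (PySem.Set.ofList pre) p)) = rest := by
    rw [List.filter_append, List.filter_cons]
    have h1 : pre.filter
        (fun p => decide (p ≠ x ∧ ¬ PySem.Set.contains (PySem.Set.ofList pre) p)) = [] := by
      rw [List.filter_eq_nil_iff]
      intro p hp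
      have : p ∈ PySem.Set.ofList pre := (PySem.Set.mem_ofList _ _).mpr hp
      simp [PySem.Set.contains_iff, this]
    have h2 : rest.filter
        (fun p => decide (p ≠ x ∧ ¬ PySem.Set.contains (PySem.Set.ofList pre) p)) = rest := by
      rw [List.filter_eq_self]
      intro p hp
      have hpx : p ≠ x := fun h' => (List.nodup_cons.mp hxr).1 (h' ▸ hp)
      have hppre : ¬ p ∈ PySem.Set.ofList pre := by
        rw [PySem.Set.mem_ofList]
        intro hm
        exact hdisj p hm p (List.mem_cons_of_mem x hp) rfl
      simp [hpx, hppre]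
    rw [h1, h2]
    simp
  show (let eligible := PySem.Set.ofList ((pre ++ x :: rest).filter _);
    if eligible ≠ [] then _ else _) = _
  rw [hfilt]
  rcases rest with _ | ⟨y, rest'⟩
  · simp [PySem.Set.ofList]
  · have hne : PySem.Set.ofList (y :: rest') ≠ [] :=
      fun h' => by simpa using (ofList_eq_nil_iff _).mp h'
    have hrest : PySem.Set.ofList (y :: rest') = y :: rest' :=
      PySem.Set.ofList_eq_self_of_nodup _ ((List.nodup_cons.mp hxr).2)
    simp only [hne, if_neg, List.cons_ne_nil, not_false_iff, ite_false, if_true]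
    rw [hrest, PySem.Set.ofList_append_singleton]
    have hx : ¬ x ∈ PySem.Set.ofList pre := by
      rw [PySem.Set.mem_ofList]
      intro hm
      exact hdisj x hm x List.mem_cons_self rfl
    rw [PySem.Set.add_eq_ite, if_neg hx]
    simp

theorem foldB (D : List String) (hnd : D.Nodup) :
    ∀ (suf pre : List String) (h : PySem.Dict String (List String)), D = pre ++ suf →
    suf.foldl (helloAltStep D) (h, PySem.Set.ofList pre)
      = ((suffPairs suf).foldl (fun d p => d.insert p.1 (PySem.Set.ofList p.2)) h,
         PySem.Set.ofList (pre ++ suf.dropLast)) := by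
  intro suf
  induction suf with
  | nil => intro pre h _; simp [suffPairs]
  | cons x rest ih =>
    intro pre h hD
    rw [List.foldl_cons, stepB D pre rest x h hnd hD]
    rcases rest with _ | ⟨y, rest'⟩
    · simp [suffPairs]
    · rw [if_neg (List.cons_ne_nil _ _)]
      rw [ih (pre ++ [x]) (h.insert x (PySem.Set.ofList (y :: rest')))
            (by rw [hD]; simp)]
      simp [suffPairs]

theorem dropLast_drop' (L : List String) (k : Nat) :
    L.dropLast.drop k = (L.drop k).dropLast := by
  rw [List.dropLast_eq_take, List.dropLast_eq_take, List.drop_take, List.length_drop]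
  congr 1
  omega

-- B's enumerate-of-slices fold is the suffPairs fold
theorem enumBridge (L : List String) :
    ∀ (m k : Nat) (h : PySem.Dict String (List String)), L.length - k = m →
    (PySem.List.enumerate (L.dropLast.drop k) (k : Int)).foldl
        (fun (d : PySem.Dict String (List String)) (p : Int × String) =>
          d.insert p.2 (PySem.Set.ofList (PySem.List.slice L (some (p.1 + 1)) none)))
        h
      = (suffPairs (L.drop k)).foldl (fun d p => d.insert p.1 (PySem.Set.ofList p.2)) h := by
  intro m
  induction m with
  | zero =>
    intro k h hm
    have h1 : L.drop k = [] := List.drop_eq_nil_of_le (by omega)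
    have h2 : L.dropLast.drop k = [] :=
      List.drop_eq_nil_of_le (by rw [List.length_dropLast]; omega)
    simp [h1, h2, suffPairs, PySem.List.enumerate]
  | succ m ihm =>
    intro k h hm
    have hk : k < L.length := by omega
    obtain ⟨x, hx⟩ : ∃ x, L.drop k = x :: L.drop (k + 1) := by
      rcases hdk : L.drop k with _ | ⟨a, t⟩
      · exact absurd hdk (by simp [List.drop_eq_nil_iff]; omega)
      · refine ⟨a, ?_⟩
        rw [← List.drop_drop] at *
        rw [hdk]; rfl
    rcases hrest : L.drop (k + 1) with _ | ⟨y, rest'⟩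
    · -- k is the last index: nothing left in dropLast
      have h2 : L.dropLast.drop k = [] := by
        apply List.drop_eq_nil_of_le
        rw [List.length_dropLast]
        have : L.length ≤ k + 1 := by
          by_contra hlt
          have := List.drop_eq_nil_iff.mp hrest
          omega
        omega
      rw [hx, hrest]
      simp [h2, suffPairs, PySem.List.enumerate]
    · have h2 : L.dropLast.drop k = x :: L.dropLast.drop (k + 1) := by
        rw [dropLast_drop', dropLast_drop', hx, hrest]
        simp
      rw [hx, hrest, h2]
      rw [PySem.List.enumerate_cons, List.foldl_cons]
      have hslice : PySem.List.slice L (some ((k : Int) + 1)) none = L.drop (k + 1) := by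
        have : ((k : Int) + 1) = ((k + 1 : Nat) : Int) := by push_cast; ring
        rw [this, PySem.List.slice_from_natCast]
      show (PySem.List.enumerate (L.dropLast.drop (k+1)) ((k:Int)+1)).foldl _
          (h.insert x (PySem.Set.ofList (PySem.List.slice L (some ((k:Int) + 1)) none))) = _
      rw [hslice, hrest]
      have hcast : ((k : Int) + 1) = ((k + 1 : Nat) : Int) := by push_cast; ring
      rw [hcast, ihm (k + 1) _ (by omega), hrest]
      simp [suffPairs]

-- ===== VERDICT (by name: the statement is the Claim_ definition above) =====
theorem hello_friend_spec : Claim_equal_hello_friend := by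
  intro NF _ _
  unfold Spec_hello_friend
  show hello_friend NF = hello_friend_alt NF
  have hnd : (PySem.List.dedup NF).Nodup := PySem.List.nodup_dedup NF
  have hfold := foldB (PySem.List.dedup NF) hnd (PySem.List.dedup NF) [] PySem.Dict.empty rfl
  have henum := enumBridge (PySem.List.dedup NF) (PySem.List.dedup NF).length 0
    PySem.Dict.empty (by omega)
  rw [show ((0 : Nat) : Int) = (0 : Int) from rfl] at henum
  simp only [List.drop_zero] at henum
  have hdict : (List.foldl (helloAltStep (PySem.List.dedup NF))
        (PySem.Dict.empty, PySem.Set.empty) (PySem.List.dedup NF)).1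
      = List.foldl (fun (d : PySem.Dict String (List String)) (p : Int × String) =>
          d.insert p.2 (PySem.Set.ofList (PySem.List.slice (PySem.List.dedup NF) (some (p.1 + 1)) none)))
          PySem.Dict.empty (PySem.List.enumerate ((PySem.List.dedup NF).dropLast) 0) := by
    rw [henum]
    rw [show (PySem.Set.empty : PySem.Set String) = PySem.Set.ofList ([] : List String) from rfl,
      hfold]
  simp only [hello_friend, hello_friend_alt, core NF, PySem.List.slice_to_neg_one, hdict]
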